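-- pv_equiv track=rewrite | github.com/emon51/Problem-Solving | Graph/BFS/LC_1319_NumberOfOperations ToMakeNetworkConnected.py | makeGraphConnected
-- ===== SOURCE A (Python) =====
-- def makeGraphConnected(n, edges, m):
--
--     if m < (n - 1):
--         return -1
--
--     adj = {u: [] for u in range(1, n + 1)}
--     for u, v in edges:
--         adj[u].append(v)
--         adj[v].append(u)
--
--     vis = set()
--
--     def dfs(u):
--         vis.add(u)
--         for v in adj[u]:
--             if v not in vis:
--                 dfs(v)
--
--     components = 0
--     for u in range(1, n + 1):
--         if u not in vis:
--             dfs(u)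
--             components += 1
--     return components - 1
-- ===== SOURCE B (Python) =====
-- def makeGraphConnected(n, edges, m):
--     if m < (n - 1):
--         return -1
--
--     adj = {}
--     for u, v in edges:
--         adj.setdefault(u, []).append(v)
--         adj.setdefault(v, []).append(u)
--
--     vis = set()
--     components = 0
--     for u in range(1, n + 1):
--         if u not in vis:
--             components += 1
--             stack = [u]
--             while stack:
--                 x = stack.pop()
--                 if x in vis:
--                     continue
--                 vis.add(x)
--                 stack.extend(reversed(adj.get(x, ())))
--     return components - 1
-- ===== Notes on version B (the rewrite author's own statement) =====
-- stated objective: alternative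
-- what changed: Recursive DFS over a pre-seeded adjacency dict is replaced by an iterative explicit-stack DFS over an adjacency dict built lazily (setdefault) only for edge endpoints, so no recursion and no O(n) dict pre-seeding.
import Mathlib
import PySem

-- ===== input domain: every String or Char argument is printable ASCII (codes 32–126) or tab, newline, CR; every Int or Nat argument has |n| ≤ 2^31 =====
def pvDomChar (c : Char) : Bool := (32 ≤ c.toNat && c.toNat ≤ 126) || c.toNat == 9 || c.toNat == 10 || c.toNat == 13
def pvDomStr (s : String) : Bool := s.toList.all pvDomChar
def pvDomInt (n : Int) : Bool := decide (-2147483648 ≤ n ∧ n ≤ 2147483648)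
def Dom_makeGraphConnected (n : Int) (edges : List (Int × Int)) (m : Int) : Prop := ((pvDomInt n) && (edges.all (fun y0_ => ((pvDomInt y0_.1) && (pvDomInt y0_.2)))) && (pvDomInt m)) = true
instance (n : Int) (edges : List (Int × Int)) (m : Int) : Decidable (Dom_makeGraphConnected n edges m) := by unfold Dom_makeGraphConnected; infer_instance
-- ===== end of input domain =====

-- B replaces A's recursive DFS (pre-seeded adjacency dict) by an iterative explicit-stack DFS
-- over a lazily built adjacency dict; return values agree on all inputs where A returns.

-- ===== PORT A =====

-- A's recursive `dfs` closing over `adj` and mutating `vis`; the Nat argument is a fuel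
-- bound on recursion depth only (each level adds one unvisited node to `vis`, so depth is
-- at most the number of nodes + 1; fuel n.toNat + 1 is proved sufficient below).
def pvDfsA (adj : Int → List Int) : Nat → Int → PySem.Set Int → PySem.Set Int
  | 0, _, vis => vis
  | f + 1, u, vis =>
      (adj u).foldl
        (fun vis v => if PySem.Set.contains vis v then vis else pvDfsA adj f v vis)
        (PySem.Set.add vis u)

def makeGraphConnected (n : Int) (edges : List (Int × Int)) (m : Int) : Int :=
  if m < n - 1 then -1
  else
    -- adj = {u: [] for u in range(1, n+1)}; then append both endpoints per edge
    let adj : PySem.Dict Int (List Int) :=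
      edges.foldl
        (fun d p => (d.modify p.1 [] (· ++ [p.2])).modify p.2 [] (· ++ [p.1]))
        ((PySem.List.pyRange 1 (n + 1)).foldl
          (fun d u => d.insert u ([] : List Int)) PySem.Dict.empty)
    let look : Int → List Int := fun x => adj.getD x []
    let res :=
      (PySem.List.pyRange 1 (n + 1)).foldl
        (fun (st : PySem.Set Int × Int) u =>
          if PySem.Set.contains st.1 u then st
          else (pvDfsA look (n.toNat + 1) u st.1, st.2 + 1))
        (PySem.Set.empty, 0)
    res.2 - 1

-- ===== PORT B =====

-- number of elements of l not yet visited (termination measure for the stack loop)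
def pvUnvis (l : List Int) (vis : PySem.Set Int) : Nat :=
  (l.filter (fun y => !PySem.Set.contains vis y)).length

lemma pv_unvis_mono (l : List Int) (vis vis' : PySem.Set Int)
    (h : ∀ y, y ∈ vis → y ∈ vis') : pvUnvis l vis' ≤ pvUnvis l vis := by
  unfold pvUnvis
  rw [← List.countP_eq_length_filter, ← List.countP_eq_length_filter]
  apply List.countP_mono_left
  intro y _ hy
  simp only [Bool.not_eq_true', ← Bool.not_eq_true, PySem.Set.contains_iff] at *
  exact fun hmem => hy (h y hmem)

lemma pv_unvis_add_lt (l : List Int) (vis : PySem.Set Int) (x : Int)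
    (hx : x ∈ l) (hnv : x ∉ vis) :
    pvUnvis l (PySem.Set.add vis x) < pvUnvis l vis := by
  have hsub : ∀ z, z ∈ vis → z ∈ PySem.Set.add vis x := by
    intro z hz; exact (PySem.Set.mem_add vis x z).mpr (Or.inl hz)
  induction l with
  | nil => cases hx
  | cons y t ih =>
    have hmt := pv_unvis_mono t vis (PySem.Set.add vis x) hsub
    by_cases hyx : y = x
    · subst hyx
      have h1 : (!PySem.Set.contains vis y) = true := by
        simp [hnv]
      have h2 : (!PySem.Set.contains (PySem.Set.add vis y) y) = false := by
        simp [PySem.Set.mem_add]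
      unfold pvUnvis
      rw [List.filter_cons, List.filter_cons, h1, h2]
      simp only [if_true, Bool.false_eq_true, if_false, List.length_cons]
      unfold pvUnvis at hmt
      omega
    · have hxe : (!PySem.Set.contains (PySem.Set.add vis x) y) = (!PySem.Set.contains vis y) := by
        congr 1
        rw [Bool.eq_iff_iff]
        simp only [PySem.Set.contains_iff, PySem.Set.mem_add]
        constructor
        · rintro (h | h)
          · exact h
          · exact absurd h hyx
        · exact Or.inl
      have hxt : x ∈ t := by
        cases hx with
        | head => exact absurd rfl hyx
        | tail _ h => exact h
      have := ih hxt
      unfold pvUnvis at this ⊢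
      rw [List.filter_cons, List.filter_cons, hxe]
      cases hcy : (!PySem.Set.contains vis y) with
      | false => simpa [hcy] using this
      | true => simp only [if_true, List.length_cons]; omega

-- B's `while stack:` loop.  Stack top = list head; pushing reversed(adj[x]) then popping
-- from the end is popping adj[x] in order, i.e. the new stack is adj x ++ rest.
-- The final `else` branch is unreachable (every stack element is drawn from univ =
-- range ++ edge endpoints); the `x ∈ univ` test only serves termination.
def pvStackLoop (adj : Int → List Int) (univ : List Int) :
    List Int → PySem.Set Int → PySem.Set Int
  | [], vis => vis
  | x :: rest, vis =>
    if PySem.Set.contains vis x then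
      pvStackLoop adj univ rest vis
    else if hx : x ∈ univ then
      pvStackLoop adj univ (adj x ++ rest) (PySem.Set.add vis x)
    else
      vis
  termination_by stack vis => (pvUnvis univ vis, stack.length)
  decreasing_by
  · apply Prod.Lex.right; simp
  · apply Prod.Lex.left
    rename_i hnc
    exact pv_unvis_add_lt univ vis x hx
      (fun hmem => hnc ((PySem.Set.contains_iff vis x).mpr hmem))

def makeGraphConnected_alt (n : Int) (edges : List (Int × Int)) (m : Int) : Int :=
  if m < n - 1 then -1
  else
    -- adj built lazily: adj.setdefault(u, []).append(v) and symmetrically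
    let adj : PySem.Dict Int (List Int) :=
      edges.foldl
        (fun d p =>
          let d1 := (d.setdefault p.1 []).modify p.1 [] (· ++ [p.2])
          (d1.setdefault p.2 []).modify p.2 [] (· ++ [p.1]))
        PySem.Dict.empty
    let look : Int → List Int := fun x => adj.getD x []
    let univ : List Int :=
      PySem.List.pyRange 1 (n + 1) ++ edges.flatMap (fun p => [p.1, p.2])
    let res :=
      (PySem.List.pyRange 1 (n + 1)).foldl
        (fun (st : PySem.Set Int × Int) u =>
          if PySem.Set.contains st.1 u then st
          else (pvStackLoop look univ [u] st.1, st.2 + 1))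
        (PySem.Set.empty, 0)
    res.2 - 1

-- ===== PRECONDITION & SPEC =====

-- Pre_ excludes exactly the inputs where A raises KeyError: m ≥ n-1 together with an edge
-- endpoint outside 1..n (A indexes its pre-seeded adjacency dict with a missing key there).
def Pre_makeGraphConnected (n : Int) (edges : List (Int × Int)) (m : Int) : Prop :=
  m < n - 1 ∨ ∀ p ∈ edges, (1 ≤ p.1 ∧ p.1 ≤ n) ∧ (1 ≤ p.2 ∧ p.2 ≤ n)
instance (n : Int) (edges : List (Int × Int)) (m : Int) : Decidable (Pre_makeGraphConnected n edges m) := by unfold Pre_makeGraphConnected; infer_instance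

def pvWitness_makeGraphConnected : Int × (List (Int × Int)) × Int := (3, [(1, 2)], 2)

def Spec_makeGraphConnected (n : Int) (edges : List (Int × Int)) (m : Int) (out : Int) : Prop := out = makeGraphConnected_alt n edges m
instance (n : Int) (edges : List (Int × Int)) (m : Int) (out : Int) : Decidable (Spec_makeGraphConnected n edges m out) := by unfold Spec_makeGraphConnected; infer_instance

-- ===== CLAIM (what is proved, stated in full; the proofs are below) =====
def Claim_equal_makeGraphConnected : Prop := ∀ (n : Int) (edges : List (Int × Int)) (m : Int), Dom_makeGraphConnected n edges m → Pre_makeGraphConnected n edges m → Spec_makeGraphConnected n edges m (makeGraphConnected n edges m)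

-- ===== LEMMAS AND PROOFS =====

-- A's inner `for v in adj[u]` loop body, as a fold (definitionally the body of pvDfsA)
def pvFoldA (adj : Int → List Int) (f : Nat) (L : List Int) (vis : PySem.Set Int) : PySem.Set Int :=
  L.foldl (fun vis v => if PySem.Set.contains vis v then vis else pvDfsA adj f v vis) vis

lemma pv_foldl_mem_mono (step : PySem.Set Int → Int → PySem.Set Int)
    (hstep : ∀ vis v y, y ∈ vis → y ∈ step vis v) :
    ∀ (L : List Int) (vis : PySem.Set Int) (y : Int), y ∈ vis → y ∈ L.foldl step vis := by
  intro L
  induction L with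
  | nil => intro vis y hy; simpa using hy
  | cons v t ih => intro vis y hy; exact ih (step vis v) y (hstep vis v y hy)

lemma pv_dfs_mono (adj : Int → List Int) :
    ∀ (f : Nat) (u : Int) (vis : PySem.Set Int) (y : Int),
      y ∈ vis → y ∈ pvDfsA adj f u vis := by
  intro f
  induction f with
  | zero => intro u vis y hy; simpa [pvDfsA] using hy
  | succ f ih =>
    intro u vis y hy
    show y ∈ (adj u).foldl _ (PySem.Set.add vis u)
    apply pv_foldl_mem_mono
    · intro vis v y hy
      by_cases h : v ∈ vis
      · simpa [h] using hy
      · simpa [h] using ih v vis y hy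
    · exact (PySem.Set.mem_add vis u y).mpr (Or.inl hy)

-- the simulation: B's stack loop with L on top of the stack equals running A's
-- neighbour fold on L first (fuel f exceeding the number k of unvisited range nodes)
lemma pv_sim (adj : Int → List Int) (rng univ : List Int)
    (hru : ∀ x, x ∈ rng → x ∈ univ)
    (hadj : ∀ x v, v ∈ adj x → v ∈ rng) :
    ∀ (k f : Nat) (L S : List Int) (vis : PySem.Set Int),
      (∀ x ∈ L, x ∈ rng) → pvUnvis rng vis ≤ k → k < f →
      pvStackLoop adj univ (L ++ S) vis = pvStackLoop adj univ S (pvFoldA adj f L vis) := by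
  intro k
  induction k using Nat.strong_induction_on with
  | _ k ihk =>
    intro f L
    induction L generalizing f with
    | nil => intro S vis _ _ _; simp [pvFoldA]
    | cons x L' ihL =>
      intro S vis hLr hk hkf
      by_cases hx : x ∈ vis
      · have hL : pvStackLoop adj univ ((x :: L') ++ S) vis = pvStackLoop adj univ (L' ++ S) vis := by
          rw [pvStackLoop.eq_def]; simp [hx]
        have hR : pvFoldA adj f (x :: L') vis = pvFoldA adj f L' vis := by
          simp [pvFoldA, hx]
        rw [hL, hR]
        exact ihL f S vis (fun y hy => hLr y (List.mem_cons_of_mem _ hy)) hk hkf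
      · cases f with
        | zero => omega
        | succ f' =>
          have hxr : x ∈ rng := hLr x List.mem_cons_self
          have hxu : x ∈ univ := hru x hxr
          have hlt : pvUnvis rng (PySem.Set.add vis x) < pvUnvis rng vis :=
            pv_unvis_add_lt rng vis x hxr hx
          have hL : pvStackLoop adj univ ((x :: L') ++ S) vis
              = pvStackLoop adj univ (adj x ++ (L' ++ S)) (PySem.Set.add vis x) := by
            rw [pvStackLoop.eq_def]; simp [hx, hxu]
          -- apply the outer IH at level k' = pvUnvis rng (vis.add x) < k
          have hstep : pvStackLoop adj univ (adj x ++ (L' ++ S)) (PySem.Set.add vis x)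
              = pvStackLoop adj univ (L' ++ S) (pvFoldA adj f' (adj x) (PySem.Set.add vis x)) := by
            apply ihk (pvUnvis rng (PySem.Set.add vis x)) (by omega) f' (adj x) (L' ++ S)
              (PySem.Set.add vis x) (fun v hv => hadj x v hv) (le_refl _) (by omega)
          have hdfs : pvFoldA adj f' (adj x) (PySem.Set.add vis x) = pvDfsA adj (f' + 1) x vis := rfl
          have hmon : pvUnvis rng (pvDfsA adj (f' + 1) x vis) ≤ k :=
            le_trans (pv_unvis_mono rng vis _ (fun y hy => pv_dfs_mono adj (f' + 1) x vis y hy)) hk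
          have hR : pvFoldA adj (f' + 1) (x :: L') vis
              = pvFoldA adj (f' + 1) L' (pvDfsA adj (f' + 1) x vis) := by
            simp [pvFoldA, hx]
          rw [hL, hstep, hdfs, hR]
          exact ihL (f' + 1) S (pvDfsA adj (f' + 1) x vis)
            (fun y hy => hLr y (List.mem_cons_of_mem _ hy)) hmon hkf

-- ----- adjacency dicts: A's pre-seeded dict and B's lazy dict agree on getD · [] -----

lemma pv_seed_getD (l : List Int) :
    ∀ (d : PySem.Dict Int (List Int)), (∀ x, d.getD x [] = []) →
      ∀ x, (l.foldl (fun d u => d.insert u ([] : List Int)) d).getD x [] = [] := by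
  induction l with
  | nil => intro d hd x; exact hd x
  | cons u t ih =>
    intro d hd x
    refine ih _ (fun y => ?_) x
    rw [PySem.Dict.getD_insert]
    split_ifs with h
    · rfl
    · exact hd y

lemma pv_setdefault_getD (d : PySem.Dict Int (List Int)) (k x : Int) :
    (d.setdefault k []).getD x [] = d.getD x [] := by
  by_cases hc : d.contains k = true
  · rw [PySem.Dict.setdefault_of_contains d [] hc]
  · rw [PySem.Dict.setdefault_of_not_contains d [] (by simpa using hc)]
    rw [PySem.Dict.getD_insert]
    split_ifs with h
    · subst h; exact (PySem.Dict.getD_of_not_contains d [] (by simpa using hc)).symm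
    · rfl

lemma pv_adj_getD_eq (edges : List (Int × Int)) :
    ∀ (dA dB : PySem.Dict Int (List Int)), (∀ x, dA.getD x [] = dB.getD x []) →
      ∀ x,
        (edges.foldl (fun d p => (d.modify p.1 [] (· ++ [p.2])).modify p.2 [] (· ++ [p.1])) dA).getD x []
        = (edges.foldl (fun d p =>
            let d1 := (d.setdefault p.1 []).modify p.1 [] (· ++ [p.2])
            (d1.setdefault p.2 []).modify p.2 [] (· ++ [p.1])) dB).getD x [] := by
  induction edges with
  | nil => intro dA dB h x; exact h x
  | cons p t ih =>
    intro dA dB h x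
    refine ih _ _ (fun y => ?_) x
    simp only [PySem.Dict.getD_modify, pv_setdefault_getD, h]

lemma pv_adj_endpoints (edges : List (Int × Int)) (P : Int → Prop)
    (hP : ∀ p ∈ edges, P p.1 ∧ P p.2) :
    ∀ (d : PySem.Dict Int (List Int)), (∀ x v, v ∈ d.getD x [] → P v) →
      ∀ x v,
        v ∈ (edges.foldl (fun d p => (d.modify p.1 [] (· ++ [p.2])).modify p.2 [] (· ++ [p.1])) d).getD x []
        → P v := by
  induction edges with
  | nil => intro d hd x v hv; exact hd x v hv
  | cons p t ih =>
    intro d hd x v hv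
    refine ih (fun q hq => hP q (List.mem_cons_of_mem _ hq)) _ (fun y w hw => ?_) x v hv
    simp only [PySem.Dict.getD_modify] at hw
    have hp := hP p List.mem_cons_self
    split_ifs at hw with h1 h2 h3
    · rcases List.mem_append.mp hw with h | h
      · rcases List.mem_append.mp h with h' | h'
        · exact hd _ w h'
        · simp only [List.mem_singleton] at h'; subst h'; exact hp.2
      · simp only [List.mem_singleton] at h; subst h; exact hp.1
    · rcases List.mem_append.mp hw with h | h
      · exact hd _ w h
      · simp only [List.mem_singleton] at h; subst h; exact hp.1
    · rcases List.mem_append.mp hw with h | h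
      · exact hd _ w h
      · simp only [List.mem_singleton] at h; subst h; exact hp.2
    · exact hd _ w hw

-- ===== VERDICT (by name: the statement is the Claim_ definition above) =====
theorem makeGraphConnected_spec : Claim_equal_makeGraphConnected := by
  intro n edges m _ hpre
  unfold Spec_makeGraphConnected makeGraphConnected makeGraphConnected_alt
  by_cases hm : m < n - 1
  · simp [hm]
  · simp only [hm, if_false]
    have hedges : ∀ p ∈ edges, (1 ≤ p.1 ∧ p.1 ≤ n) ∧ (1 ≤ p.2 ∧ p.2 ≤ n) := by
      cases hpre with
      | inl h => exact absurd h hm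
      | inr h => exact h
    set rng := PySem.List.pyRange 1 (n + 1) with hrng
    set adjA : PySem.Dict Int (List Int) :=
      edges.foldl (fun d p => (d.modify p.1 [] (· ++ [p.2])).modify p.2 [] (· ++ [p.1]))
        (rng.foldl (fun d u => d.insert u ([] : List Int)) PySem.Dict.empty) with hadjA
    set adjB : PySem.Dict Int (List Int) :=
      edges.foldl (fun d p =>
          let d1 := (d.setdefault p.1 []).modify p.1 [] (· ++ [p.2])
          (d1.setdefault p.2 []).modify p.2 [] (· ++ [p.1])) PySem.Dict.empty with hadjB
    have hlook : (fun x => adjB.getD x []) = (fun x => adjA.getD x []) := by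
      funext x
      exact (pv_adj_getD_eq edges _ PySem.Dict.empty
        (fun y => by rw [pv_seed_getD rng PySem.Dict.empty (fun _ => rfl) y]; rfl) x).symm
    set univ : List Int := rng ++ edges.flatMap (fun p => [p.1, p.2]) with huniv
    have hmemrng : ∀ x : Int, x ∈ rng ↔ (1 ≤ x ∧ x ≤ n) := by
      intro x
      rw [hrng, PySem.List.mem_pyRange_one]
      omega
    have hadj : ∀ x v, v ∈ adjA.getD x [] → v ∈ rng := by
      intro x v hv
      rw [hmemrng]
      refine pv_adj_endpoints edges (fun v => 1 ≤ v ∧ v ≤ n) ?_ _ ?_ x v hv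
      · intro p hp; exact ⟨(hedges p hp).1, (hedges p hp).2⟩
      · intro y w hw
        rw [pv_seed_getD rng PySem.Dict.empty (fun _ => rfl) y] at hw
        cases hw
    have hfold :
        rng.foldl (fun (st : PySem.Set Int × Int) u =>
            if PySem.Set.contains st.1 u then st
            else (pvDfsA (fun x => adjA.getD x []) (n.toNat + 1) u st.1, st.2 + 1))
          (PySem.Set.empty, 0)
        = rng.foldl (fun (st : PySem.Set Int × Int) u =>
            if PySem.Set.contains st.1 u then st
            else (pvStackLoop (fun x => adjB.getD x []) univ [u] st.1, st.2 + 1))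
          (PySem.Set.empty, 0) := by
      apply PySem.List.foldl_congr_mem
      intro st u hu
      by_cases hc : u ∈ st.1
      · simp [hc]
      · have hk : pvUnvis rng st.1 ≤ n.toNat := by
          have h1 : pvUnvis rng st.1 ≤ rng.length := by
            unfold pvUnvis; exact List.length_filter_le _ _
          have h2 : rng.length = n.toNat := by
            rw [hrng, PySem.List.length_pyRange_one]
            congr 1
            omega
          omega
        have hsim := pv_sim (fun x => adjA.getD x []) rng univ
          (fun x hx => List.mem_append.mpr (Or.inl hx)) hadj
          (pvUnvis rng st.1) (n.toNat + 1) [u] [] st.1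
          (by intro y hy; simp only [List.mem_singleton] at hy; subst hy; exact hu)
          (le_refl _) (by omega)
        simp only [List.append_nil] at hsim
        have h0 : pvStackLoop (fun x => adjA.getD x []) univ []
              (pvFoldA (fun x => adjA.getD x []) (n.toNat + 1) [u] st.1)
            = pvFoldA (fun x => adjA.getD x []) (n.toNat + 1) [u] st.1 := by
          rw [pvStackLoop]
        have h1 : pvFoldA (fun x => adjA.getD x []) (n.toNat + 1) [u] st.1
            = pvDfsA (fun x => adjA.getD x []) (n.toNat + 1) u st.1 := by
          simp [pvFoldA, hc]
        have hcb : ¬ PySem.Set.contains st.1 u = true :=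
          fun h => hc ((PySem.Set.contains_iff st.1 u).mp h)
        rw [hlook]
        rw [if_neg hcb, if_neg hcb, hsim, h0, h1]
    rw [hfold]
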